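-- pv_equiv track=rewrite | github.com/woaksths/ssl-classification | lexicon_util/lexicon_operation.py | get_lexicon_overlap_words
-- ===== SOURCE A (Python) =====
-- def get_lexicon_overlap_words(lexicon):
--     overlap = {}
--     filter_word = set()
--     for label in lexicon.keys():
--         for word in lexicon[label]:
--             if '#' in word or word.isdecimal() or len(word) <= 2:
--                 filter_word.add(word)
--                 continue
--             if word in overlap:
--                 overlap[word] += 1
--                 filter_word.add(word)
--             else:
--                 overlap[word] = 1
--     return filter_word
-- ===== SOURCE B (Python) =====
-- def get_lexicon_overlap_words(lexicon):
--     words = [w for ws in lexicon.values() for w in ws]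
--     first = {}
--     for i, word in enumerate(words):
--         if word not in first:
--             first[word] = i
--     filter_word = set()
--     for i, word in enumerate(words):
--         if '#' in word or word.isdecimal() or len(word) <= 2 or first[word] < i:
--             filter_word.add(word)
--     return filter_word
-- ===== Notes on version B (the rewrite author's own statement) =====
-- stated objective: alternative
-- what changed: B drops A's inline overlap-count dict marking: it flattens all label word-lists once, builds a first-occurrence index table in one pass, and then a second enumerate pass emits a word if it matches the filter predicate or its first occurrence lies strictly before the current position.
import Mathlib
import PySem

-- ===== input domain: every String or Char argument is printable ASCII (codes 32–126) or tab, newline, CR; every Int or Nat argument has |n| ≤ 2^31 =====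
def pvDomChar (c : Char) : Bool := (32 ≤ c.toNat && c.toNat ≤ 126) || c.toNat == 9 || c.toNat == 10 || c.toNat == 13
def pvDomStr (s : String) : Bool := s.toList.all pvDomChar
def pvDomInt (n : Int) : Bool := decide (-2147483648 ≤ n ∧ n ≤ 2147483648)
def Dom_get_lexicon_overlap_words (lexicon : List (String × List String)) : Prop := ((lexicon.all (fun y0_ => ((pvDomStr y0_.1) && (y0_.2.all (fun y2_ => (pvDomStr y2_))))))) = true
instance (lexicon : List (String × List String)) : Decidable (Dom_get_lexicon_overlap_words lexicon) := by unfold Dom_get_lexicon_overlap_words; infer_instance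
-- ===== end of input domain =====

-- B replaces A's incremental overlap-count dict by one flatten + one enumerate loop testing
-- membership in the flattened prefix (simpler decomposition; not faster).


-- ===== PORT A =====
-- the filter predicate, shared verbatim by both Pythons;
-- word.isdecimal() is ported as PySem.Str.strIsdigit: on the printable-ASCII domain both mean "nonempty, all of 0-9"
def pvIsFiltered (word : String) : Bool :=
  PySem.Str.isIn "#" word || PySem.Str.strIsdigit word || decide (PySem.Str.len word ≤ 2)

def get_lexicon_overlap_words (lexicon : List (String × List String)) : List String :=
  ((PySem.Dict.mk lexicon).keys.foldl
    (fun (st : PySem.Dict String Int × PySem.Set String) label =>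
      ((PySem.Dict.mk lexicon).getD label []).foldl
        (fun st word =>
          if pvIsFiltered word then (st.1, PySem.Set.add st.2 word)
          else if st.1.contains word then (st.1.modify word 0 (· + 1), PySem.Set.add st.2 word)
          else (st.1.insert word 1, st.2))
        st)
    (PySem.Dict.empty, PySem.Set.empty)).2

-- ===== PORT B =====
def get_lexicon_overlap_words_alt (lexicon : List (String × List String)) : List String :=
  let words := (PySem.Dict.mk lexicon).values.flatMap (fun ws => ws)
  let first := (PySem.List.enumerate words 0).foldl
    (fun (d : PySem.Dict String Int) iw =>
      if d.contains iw.2 then d else d.insert iw.2 iw.1)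
    PySem.Dict.empty
  -- first[word]: raising lookup, ported as getD 0; the key is always present (inserted by the first pass)
  (PySem.List.enumerate words 0).foldl
    (fun fw iw =>
      if pvIsFiltered iw.2 || decide (first.getD iw.2 0 < iw.1)
      then PySem.Set.add fw iw.2 else fw)
    PySem.Set.empty

-- ===== PRECONDITION & SPEC =====
-- Pre_ requires distinct labels: the argument is a Python dict, whose association-list
-- representation cannot carry duplicate keys, so nothing A accepts is excluded.
def Pre_get_lexicon_overlap_words (lexicon : List (String × List String)) : Prop :=
  (lexicon.map Prod.fst).Nodup
instance (lexicon : List (String × List String)) : Decidable (Pre_get_lexicon_overlap_words lexicon) := by unfold Pre_get_lexicon_overlap_words; infer_instance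

def pvWitness_get_lexicon_overlap_words : (List (String × List String)) :=
  [("pos", ["alpha", "beta", "xy", "alpha"]), ("neg", ["beta", "12", "word#tag", "gamma"])]

def Spec_get_lexicon_overlap_words (lexicon : List (String × List String)) (out : List String) : Prop := out = get_lexicon_overlap_words_alt lexicon
instance (lexicon : List (String × List String)) (out : List String) : Decidable (Spec_get_lexicon_overlap_words lexicon out) := by unfold Spec_get_lexicon_overlap_words; infer_instance

-- ===== CLAIM (what is proved, stated in full; the proofs are below) =====
def Claim_equal_get_lexicon_overlap_words : Prop := ∀ (lexicon : List (String × List String)), Dom_get_lexicon_overlap_words lexicon → Pre_get_lexicon_overlap_words lexicon → Spec_get_lexicon_overlap_words lexicon (get_lexicon_overlap_words lexicon)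

-- ===== LEMMAS AND PROOFS =====
-- A's per-word step, (overlap dict, filter set) as state
def pvAStep (st : PySem.Dict String Int × PySem.Set String) (word : String) :
    PySem.Dict String Int × PySem.Set String :=
  if pvIsFiltered word then (st.1, PySem.Set.add st.2 word)
  else if st.1.contains word then (st.1.modify word 0 (· + 1), PySem.Set.add st.2 word)
  else (st.1.insert word 1, st.2)

-- B's per-word step over the fixed flattened list `words`
def pvBStep (words : List String) (fw : PySem.Set String) (iw : Int × String) : PySem.Set String :=
  if pvIsFiltered iw.2 || (PySem.List.slice words none (some iw.1)).contains iw.2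
  then PySem.Set.add fw iw.2 else fw

theorem pvA_flatten (lexicon : List (String × List String))
    (h : (lexicon.map Prod.fst).Nodup) (st : PySem.Dict String Int × PySem.Set String) :
    (PySem.Dict.mk lexicon).keys.foldl
      (fun st label => ((PySem.Dict.mk lexicon).getD label []).foldl pvAStep st) st
    = (lexicon.flatMap Prod.snd).foldl pvAStep st := by
  induction lexicon generalizing st with
  | nil => rfl
  | cons kv rest ih =>
    obtain ⟨k, v⟩ := kv
    simp only [List.map_cons, List.nodup_cons] at h
    have hkeys : (PySem.Dict.mk ((k, v) :: rest)).keys = k :: (PySem.Dict.mk rest).keys := by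
      simp [PySem.Dict.keys_mk]
    rw [hkeys]
    simp only [List.foldl_cons, List.flatMap_cons, List.foldl_append]
    have hself : (PySem.Dict.mk ((k, v) :: rest)).getD k [] = v := by
      simp [PySem.Dict.getD, PySem.Dict.get?_mk_cons]
    rw [hself]
    rw [PySem.List.foldl_congr_mem (l := (PySem.Dict.mk rest).keys)
      (g := fun st label => ((PySem.Dict.mk rest).getD label []).foldl pvAStep st)]
    · exact ih h.2 _
    · intro st' label hmem
      have hne : k ≠ label := by
        intro he; subst he
        exact h.1 (by simpa [PySem.Dict.keys_mk] using hmem)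
      have : (PySem.Dict.mk ((k, v) :: rest)).getD label [] = (PySem.Dict.mk rest).getD label [] := by
        simp [PySem.Dict.getD, PySem.Dict.get?_mk_cons, hne]
      rw [this]

theorem pvCore (words : List String) :
    ∀ (rest p : List String) (d : PySem.Dict String Int) (fw : PySem.Set String),
      words = p ++ rest →
      (∀ w, d.contains w = (!pvIsFiltered w && p.contains w)) →
      (rest.foldl pvAStep (d, fw)).2
        = (PySem.List.enumerate rest (p.length : Int)).foldl (pvBStep words) fw := by
  intro rest
  induction rest with
  | nil => intro p d fw _ _; simp [PySem.List.enumerate]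
  | cons w rest ih =>
    intro p d fw hw hd
    rw [PySem.List.enumerate_cons]
    have hslice : PySem.List.slice words none (some (p.length : Int)) = p := by
      rw [PySem.List.slice_to_natCast, hw, List.take_append_of_le_length (le_refl _)]
      simp
    have hstep2 : pvBStep words fw ((p.length : Int), w)
        = if pvIsFiltered w || p.contains w then PySem.Set.add fw w else fw := by
      simp [pvBStep, hslice]
    have hlen : ((p ++ [w]).length : Int) = (p.length : Int) + 1 := by
      simp
    simp only [List.foldl_cons, hstep2]
    by_cases hb : pvIsFiltered w
    · have hA : pvAStep (d, fw) w = (d, PySem.Set.add fw w) := by simp [pvAStep, hb]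
      have hd' : ∀ w', d.contains w' = (!pvIsFiltered w' && (p ++ [w]).contains w') := by
        intro w'
        rw [hd w']
        by_cases hww : w' = w
        · subst hww; simp [hb]
        · simp [hww]
      have hnext := ih (p ++ [w]) d (PySem.Set.add fw w) (by simp [hw]) hd'
      rw [hlen] at hnext
      have hif : (if pvIsFiltered w || p.contains w then PySem.Set.add fw w else fw)
          = PySem.Set.add fw w := by simp [hb]
      rw [hA, hif, hnext]
    · by_cases hc : p.contains w
      · have hcm : w ∈ p := by simpa using hc
        have hdc : d.contains w = true := by rw [hd w]; simp [hb, hcm]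
        have hA : pvAStep (d, fw) w = (d.modify w 0 (· + 1), PySem.Set.add fw w) := by
          simp [pvAStep, hb, hdc]
        have hd' : ∀ w', (d.modify w 0 (· + 1)).contains w'
            = (!pvIsFiltered w' && (p ++ [w]).contains w') := by
          intro w'
          by_cases hww : w' = w
          · subst hww; simp [PySem.Dict.contains_modify, hb]
          · simp [PySem.Dict.contains_modify, hww, hd w']
        have hnext := ih (p ++ [w]) _ (PySem.Set.add fw w) (by simp [hw]) hd'
        rw [hlen] at hnext
        have hif : (if pvIsFiltered w || p.contains w then PySem.Set.add fw w else fw)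
            = PySem.Set.add fw w := by simp [hcm]
        rw [hA, hif, hnext]
      · have hcm : w ∉ p := by simpa using hc
        have hdc : d.contains w = false := by rw [hd w]; simp [hcm]
        have hA : pvAStep (d, fw) w = (d.insert w 1, fw) := by
          simp [pvAStep, hb, hdc]
        have hd' : ∀ w', (d.insert w 1).contains w'
            = (!pvIsFiltered w' && (p ++ [w]).contains w') := by
          intro w'
          by_cases hww : w' = w
          · subst hww; simp [hb]
          · simp [PySem.Dict.contains_insert, hww, hd w']
        have hnext := ih (p ++ [w]) _ fw (by simp [hw]) hd'
        rw [hlen] at hnext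
        have hif : (if pvIsFiltered w || p.contains w then PySem.Set.add fw w else fw) = fw := by
          simp [hb, hcm]
        rw [hA, hif, hnext]

def pvFirstStep (d : PySem.Dict String Int) (iw : Int × String) : PySem.Dict String Int :=
  if d.contains iw.2 then d else d.insert iw.2 iw.1

theorem pvFirst_get? : ∀ (ws : List String) (s : Int) (d : PySem.Dict String Int) (w : String),
    ((PySem.List.enumerate ws s).foldl pvFirstStep d).get? w
      = if d.contains w then d.get? w
        else if w ∈ ws then some (s + (ws.idxOf w : Int)) else none := by
  intro ws
  induction ws with
  | nil =>
    intro s d w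
    by_cases h : d.contains w
    · simp [PySem.List.enumerate_nil, h]
    · simp [PySem.List.enumerate_nil, h, PySem.Dict.get?_eq_none_iff_contains]
  | cons x ws ih =>
    intro s d w
    rw [PySem.List.enumerate_cons]
    simp only [List.foldl_cons]
    by_cases hx : d.contains x
    · rw [show pvFirstStep d (s, x) = d from by simp [pvFirstStep, hx]]
      rw [ih (s + 1) d w]
      by_cases hw : d.contains w
      · simp [hw]
      · by_cases hwx : w = x
        · subst hwx; exact absurd hx hw
        · by_cases hmem : w ∈ ws
          · simp only [hw, hmem, if_true, List.mem_cons, hwx, false_or,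
              List.idxOf_cons_ne _ (by exact fun he => hwx he.symm)]
            congr 1
            push_cast
            ring
          · simp [hw, hmem, hwx]
    · rw [show pvFirstStep d (s, x) = d.insert x s from by simp [pvFirstStep, hx]]
      rw [ih (s + 1) _ w]
      by_cases hwx : w = x
      · subst hwx
        simp [PySem.Dict.contains_insert_self, PySem.Dict.get?_insert_self, hx]
      · have hcont : (d.insert x s).contains w = d.contains w := by
          simp [PySem.Dict.contains_insert, hwx]
        have hget : (d.insert x s).get? w = d.get? w := by
          rw [PySem.Dict.get?_insert_of_ne d s hwx]
        rw [hcont, hget]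
        by_cases hw : d.contains w
        · simp [hw]
        · by_cases hmem : w ∈ ws
          · simp only [hw, hmem, if_true, List.mem_cons, hwx, false_or,
              List.idxOf_cons_ne _ (by exact fun he => hwx he.symm)]
            congr 1
            push_cast
            ring
          · simp [hw, hmem, hwx]

-- ===== VERDICT (by name: the statement is the Claim_ definition above) =====
theorem get_lexicon_overlap_words_spec : Claim_equal_get_lexicon_overlap_words := by
  intro lexicon _ hpre
  unfold Spec_get_lexicon_overlap_words
  have hvals : (PySem.Dict.mk lexicon).values.flatMap (fun ws => ws)
      = lexicon.flatMap Prod.snd := by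
    simp [PySem.Dict.values_mk, List.flatMap_map]
  have halt : get_lexicon_overlap_words_alt lexicon
      = (PySem.List.enumerate ((PySem.Dict.mk lexicon).values.flatMap (fun ws => ws)) 0).foldl
          (fun fw iw =>
            if pvIsFiltered iw.2 ||
                decide (((PySem.List.enumerate
                    ((PySem.Dict.mk lexicon).values.flatMap (fun ws => ws)) 0).foldl
                  pvFirstStep PySem.Dict.empty).getD iw.2 0 < iw.1)
            then PySem.Set.add fw iw.2 else fw)
          PySem.Set.empty := rfl
  have ha : get_lexicon_overlap_words lexicon
      = ((PySem.Dict.mk lexicon).keys.foldl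
          (fun st label => ((PySem.Dict.mk lexicon).getD label []).foldl pvAStep st)
          (PySem.Dict.empty, PySem.Set.empty)).2 := rfl
  rw [ha, halt, hvals, pvA_flatten lexicon hpre]
  set W := lexicon.flatMap Prod.snd with hW
  -- B's second pass tests the same condition as membership in the flattened prefix
  rw [PySem.List.foldl_congr_mem (g := pvBStep W)]
  · have hcore := pvCore W W [] PySem.Dict.empty PySem.Set.empty rfl
      (by intro w; simp [PySem.Dict.contains_empty])
    simpa using hcore
  · intro fw iw hmem
    rw [PySem.List.mem_enumerate_iff] at hmem
    obtain ⟨k, hk, hiw⟩ := hmem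
    subst hiw
    have hmemW : W[k] ∈ W := List.getElem_mem hk
    have hfirst : ((PySem.List.enumerate W 0).foldl pvFirstStep PySem.Dict.empty).getD
        (W[k]) 0 = (W.idxOf (W[k]) : Int) := by
      simp [PySem.Dict.getD, pvFirst_get?, PySem.Dict.contains_empty, hmemW]
    have hslice : PySem.List.slice W none (some ((0 : Int) + (k : Int))) = W.take k := by
      rw [show (0 : Int) + (k : Int) = ((k : Nat) : Int) by omega, PySem.List.slice_to_natCast]
    have hmt := List.mem_take_iff_idxOf_lt (n := k) hmemW
    simp only [pvBStep, hfirst, hslice]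
    simp [hmt]
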